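-- pv_equiv track=rewrite | github.com/ashanr/student_decision_support | course_selection_assistant.py | is_in_same_region
-- ===== SOURCE A (Python) =====
-- def is_in_same_region(country, preferred_countries):
--     """Check if a country is in the same region as any preferred country."""
--     # Simple region groupings
--     regions = {
--         'europe': ['germany', 'france', 'italy', 'spain', 'netherlands',
--                    'belgium', 'austria', 'switzerland', 'uk', 'ireland'],
--         'north_america': ['usa', 'united states', 'canada', 'mexico'],
--         'asia': ['china', 'japan', 'south korea', 'singapore', 'india', 'malaysia'],
--         'oceania': ['australia', 'new zealand'],
--     }
--
--     # Find region of the country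
--     country_region = None
--     for region, countries in regions.items():
--         if country.lower() in countries:
--             country_region = region
--             break
--
--     # Check if any preferred country is in the same region
--     if country_region:
--         for preferred in preferred_countries:
--             for region, countries in regions.items():
--                 if preferred in countries and region == country_region:
--                     return True
--
--     return False
-- ===== SOURCE B (Python) =====
-- # Inverted index: map each known country directly to its region, so the check
-- # is one lookup for the country and one lookup per preferred country.
-- _REGION_OF = {
--     'germany': 'europe', 'france': 'europe', 'italy': 'europe',
--     'spain': 'europe', 'netherlands': 'europe', 'belgium': 'europe',
--     'austria': 'europe', 'switzerland': 'europe', 'uk': 'europe',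
--     'ireland': 'europe',
--     'usa': 'north_america', 'united states': 'north_america',
--     'canada': 'north_america', 'mexico': 'north_america',
--     'china': 'asia', 'japan': 'asia', 'south korea': 'asia',
--     'singapore': 'asia', 'india': 'asia', 'malaysia': 'asia',
--     'australia': 'oceania', 'new zealand': 'oceania',
-- }
--
--
-- def is_in_same_region(country, preferred_countries):
--     """Check if a country is in the same region as any preferred country."""
--     country_region = _REGION_OF.get(country.lower())
--     if country_region is None:
--         return False
--     return any(_REGION_OF.get(preferred) == country_region
--                for preferred in preferred_countries)
-- ===== Notes on version B (the rewrite author's own statement) =====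
-- stated objective: simpler
-- what changed: Replaces A's linear scan of the region table plus a nested preferred-countries x regions x members triple loop with a single flat country-to-region inverted dict, so the check becomes one lookup for the country and one lookup per preferred country.
import Mathlib
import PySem

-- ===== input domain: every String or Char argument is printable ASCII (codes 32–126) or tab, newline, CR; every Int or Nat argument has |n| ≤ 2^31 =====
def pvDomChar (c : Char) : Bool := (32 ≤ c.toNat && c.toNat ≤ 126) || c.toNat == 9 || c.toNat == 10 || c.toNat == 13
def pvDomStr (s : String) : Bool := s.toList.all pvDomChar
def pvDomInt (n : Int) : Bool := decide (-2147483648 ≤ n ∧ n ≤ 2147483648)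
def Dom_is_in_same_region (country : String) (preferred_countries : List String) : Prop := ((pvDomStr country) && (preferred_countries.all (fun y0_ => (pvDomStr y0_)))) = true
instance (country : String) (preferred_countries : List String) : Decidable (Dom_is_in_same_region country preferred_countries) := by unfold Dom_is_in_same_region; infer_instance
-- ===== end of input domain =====

-- B replaces A's nested scans over the region table with one flat country→region index (two lookups); objective: simpler.


-- ===== PORT A =====
-- the module constant `regions`, in source order
def pyRegions : List (String × List String) :=
  [("europe", ["germany", "france", "italy", "spain", "netherlands", "belgium", "austria", "switzerland", "uk", "ireland"]),
   ("north_america", ["usa", "united states", "canada", "mexico"]),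
   ("asia", ["china", "japan", "south korea", "singapore", "india", "malaysia"]),
   ("oceania", ["australia", "new zealand"])]

-- first loop of A: find the (first) region whose country list contains cl, else None
def findRegionA : List (String × List String) → String → Option String
  | [], _ => none
  | (region, countries) :: rest, cl =>
      if countries.contains cl then some region else findRegionA rest cl

-- `if country_region:` is `isSome` here because every region name in the table is a nonempty string
def is_in_same_region (country : String) (preferred_countries : List String) : Bool :=
  match findRegionA pyRegions (PySem.Str.lower country) with
  | some country_region =>
      preferred_countries.any (fun preferred =>
        pyRegions.any (fun rc => rc.2.contains preferred && rc.1 == country_region))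
  | none => false

-- ===== PORT B =====
-- Source B's literal inverted dict _REGION_OF (keys distinct)
def altTable : PySem.Dict String String :=
  PySem.Dict.mk [("germany", "europe"), ("france", "europe"), ("italy", "europe"), ("spain", "europe"), ("netherlands", "europe"), ("belgium", "europe"), ("austria", "europe"), ("switzerland", "europe"), ("uk", "europe"), ("ireland", "europe"), ("usa", "north_america"), ("united states", "north_america"), ("canada", "north_america"), ("mexico", "north_america"), ("china", "asia"), ("japan", "asia"), ("south korea", "asia"), ("singapore", "asia"), ("india", "asia"), ("malaysia", "asia"), ("australia", "oceania"), ("new zealand", "oceania")]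

def is_in_same_region_alt (country : String) (preferred_countries : List String) : Bool :=
  match altTable.get? (PySem.Str.lower country) with
  | none => false
  | some country_region =>
      preferred_countries.any (fun preferred => altTable.get? preferred == some country_region)

-- ===== PRECONDITION & SPEC =====
def Spec_is_in_same_region (country : String) (preferred_countries : List String) (out : Bool) : Prop := out = is_in_same_region_alt country preferred_countries
instance (country : String) (preferred_countries : List String) (out : Bool) : Decidable (Spec_is_in_same_region country preferred_countries out) := by unfold Spec_is_in_same_region; infer_instance

-- ===== CLAIM (what is proved, stated in full; the proofs are below) =====
def Claim_equal_is_in_same_region : Prop := ∀ (country : String) (preferred_countries : List String), Dom_is_in_same_region country preferred_countries → Spec_is_in_same_region country preferred_countries (is_in_same_region country preferred_countries)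

-- ===== LEMMAS AND PROOFS =====

-- A's region-of-country scan agrees with B's inverted-index lookup on every string
theorem regionOf_eq (s : String) : findRegionA pyRegions s = altTable.get? s := by
  by_cases h0 : s = "germany"
  · subst h0; decide
  by_cases h1 : s = "france"
  · subst h1; decide
  by_cases h2 : s = "italy"
  · subst h2; decide
  by_cases h3 : s = "spain"
  · subst h3; decide
  by_cases h4 : s = "netherlands"
  · subst h4; decide
  by_cases h5 : s = "belgium"
  · subst h5; decide
  by_cases h6 : s = "austria"
  · subst h6; decide
  by_cases h7 : s = "switzerland"
  · subst h7; decide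
  by_cases h8 : s = "uk"
  · subst h8; decide
  by_cases h9 : s = "ireland"
  · subst h9; decide
  by_cases h10 : s = "usa"
  · subst h10; decide
  by_cases h11 : s = "united states"
  · subst h11; decide
  by_cases h12 : s = "canada"
  · subst h12; decide
  by_cases h13 : s = "mexico"
  · subst h13; decide
  by_cases h14 : s = "china"
  · subst h14; decide
  by_cases h15 : s = "japan"
  · subst h15; decide
  by_cases h16 : s = "south korea"
  · subst h16; decide
  by_cases h17 : s = "singapore"
  · subst h17; decide
  by_cases h18 : s = "india"
  · subst h18; decide
  by_cases h19 : s = "malaysia"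
  · subst h19; decide
  by_cases h20 : s = "australia"
  · subst h20; decide
  by_cases h21 : s = "new zealand"
  · subst h21; decide
  · simp [findRegionA, pyRegions, altTable, PySem.Dict.get?_mk_cons, PySem.Dict.get?, h0, Ne.symm h0, h1, Ne.symm h1, h2, Ne.symm h2, h3, Ne.symm h3, h4, Ne.symm h4, h5, Ne.symm h5, h6, Ne.symm h6, h7, Ne.symm h7, h8, Ne.symm h8, h9, Ne.symm h9, h10, Ne.symm h10, h11, Ne.symm h11, h12, Ne.symm h12, h13, Ne.symm h13, h14, Ne.symm h14, h15, Ne.symm h15, h16, Ne.symm h16, h17, Ne.symm h17, h18, Ne.symm h18, h19, Ne.symm h19, h20, Ne.symm h20, h21, Ne.symm h21]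

-- A's inner double scan (preferred in countries and region == country_region) agrees with B's lookup test
theorem inner_eq (p cr : String) :
    pyRegions.any (fun rc => rc.2.contains p && rc.1 == cr)
      = (altTable.get? p == some cr) := by
  by_cases h0 : p = "germany"
  · subst h0; simp [pyRegions, altTable, PySem.Dict.get?_mk_cons]
  by_cases h1 : p = "france"
  · subst h1; simp [pyRegions, altTable, PySem.Dict.get?_mk_cons]
  by_cases h2 : p = "italy"
  · subst h2; simp [pyRegions, altTable, PySem.Dict.get?_mk_cons]
  by_cases h3 : p = "spain"
  · subst h3; simp [pyRegions, altTable, PySem.Dict.get?_mk_cons]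
  by_cases h4 : p = "netherlands"
  · subst h4; simp [pyRegions, altTable, PySem.Dict.get?_mk_cons]
  by_cases h5 : p = "belgium"
  · subst h5; simp [pyRegions, altTable, PySem.Dict.get?_mk_cons]
  by_cases h6 : p = "austria"
  · subst h6; simp [pyRegions, altTable, PySem.Dict.get?_mk_cons]
  by_cases h7 : p = "switzerland"
  · subst h7; simp [pyRegions, altTable, PySem.Dict.get?_mk_cons]
  by_cases h8 : p = "uk"
  · subst h8; simp [pyRegions, altTable, PySem.Dict.get?_mk_cons]
  by_cases h9 : p = "ireland"
  · subst h9; simp [pyRegions, altTable, PySem.Dict.get?_mk_cons]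
  by_cases h10 : p = "usa"
  · subst h10; simp [pyRegions, altTable, PySem.Dict.get?_mk_cons]
  by_cases h11 : p = "united states"
  · subst h11; simp [pyRegions, altTable, PySem.Dict.get?_mk_cons]
  by_cases h12 : p = "canada"
  · subst h12; simp [pyRegions, altTable, PySem.Dict.get?_mk_cons]
  by_cases h13 : p = "mexico"
  · subst h13; simp [pyRegions, altTable, PySem.Dict.get?_mk_cons]
  by_cases h14 : p = "china"
  · subst h14; simp [pyRegions, altTable, PySem.Dict.get?_mk_cons]
  by_cases h15 : p = "japan"
  · subst h15; simp [pyRegions, altTable, PySem.Dict.get?_mk_cons]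
  by_cases h16 : p = "south korea"
  · subst h16; simp [pyRegions, altTable, PySem.Dict.get?_mk_cons]
  by_cases h17 : p = "singapore"
  · subst h17; simp [pyRegions, altTable, PySem.Dict.get?_mk_cons]
  by_cases h18 : p = "india"
  · subst h18; simp [pyRegions, altTable, PySem.Dict.get?_mk_cons]
  by_cases h19 : p = "malaysia"
  · subst h19; simp [pyRegions, altTable, PySem.Dict.get?_mk_cons]
  by_cases h20 : p = "australia"
  · subst h20; simp [pyRegions, altTable, PySem.Dict.get?_mk_cons]
  by_cases h21 : p = "new zealand"
  · subst h21; simp [pyRegions, altTable, PySem.Dict.get?_mk_cons]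
  · simp [pyRegions, altTable, PySem.Dict.get?_mk_cons, PySem.Dict.get?, h0, Ne.symm h0, h1, Ne.symm h1, h2, Ne.symm h2, h3, Ne.symm h3, h4, Ne.symm h4, h5, Ne.symm h5, h6, Ne.symm h6, h7, Ne.symm h7, h8, Ne.symm h8, h9, Ne.symm h9, h10, Ne.symm h10, h11, Ne.symm h11, h12, Ne.symm h12, h13, Ne.symm h13, h14, Ne.symm h14, h15, Ne.symm h15, h16, Ne.symm h16, h17, Ne.symm h17, h18, Ne.symm h18, h19, Ne.symm h19, h20, Ne.symm h20, h21, Ne.symm h21]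

-- ===== VERDICT (by name: the statement is the Claim_ definition above) =====
theorem is_in_same_region_spec : Claim_equal_is_in_same_region := by
  intro country preferred_countries _
  unfold Spec_is_in_same_region is_in_same_region is_in_same_region_alt
  rw [regionOf_eq]
  cases altTable.get? (PySem.Str.lower country) with
  | none => rfl
  | some cr => simp only [inner_eq]
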